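-- pv_equiv track=rewrite | github.com/Zhonghao1995/agentic-swmm-workflow | scripts/check_package_boundary.py | _logical_path
-- ===== SOURCE A (Python) =====
-- def _logical_path(name: str) -> str:
--     normalized = name.replace("\\", "/").lstrip("/")
--     parts = normalized.split("/")
--     for index in range(len(parts) - 3):
--         if parts[index].endswith(".data") and parts[index + 1 : index + 3] == ["data", "aiswmm"]:
--             return "/" + "/".join(parts[index + 3 :])
--     if parts and parts[0].startswith("aiswmm-"):
--         return "/" + "/".join(parts[1:])
--     return "/" + normalized
-- ===== SOURCE B (Python) =====
-- def _logical_path(name: str) -> str: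
--     normalized = name.replace("\\", "/").lstrip("/")
--     marker = ".data/data/aiswmm/"
--     pos = normalized.find(marker)
--     if pos != -1:
--         return "/" + normalized[pos + len(marker):]
--     if normalized.startswith("aiswmm-"):
--         sep = normalized.find("/")
--         if sep != -1:
--             return "/" + normalized[sep + 1:]
--         return "/"
--     return "/" + normalized
-- ===== Notes on version B (the rewrite author's own statement) =====
-- stated objective: alternative
-- what changed: Instead of splitting the path into segments and scanning segment indices with per-index slice comparisons, B locates the package boundary with a single substring search for the marker '.data/data/aiswmm/' on the normalized string (the trailing slash in the marker reproduces A's requirement that a segment follow the package directory), and handles the package-prefix fallback with startswith/find instead of split and join.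
import Mathlib
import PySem

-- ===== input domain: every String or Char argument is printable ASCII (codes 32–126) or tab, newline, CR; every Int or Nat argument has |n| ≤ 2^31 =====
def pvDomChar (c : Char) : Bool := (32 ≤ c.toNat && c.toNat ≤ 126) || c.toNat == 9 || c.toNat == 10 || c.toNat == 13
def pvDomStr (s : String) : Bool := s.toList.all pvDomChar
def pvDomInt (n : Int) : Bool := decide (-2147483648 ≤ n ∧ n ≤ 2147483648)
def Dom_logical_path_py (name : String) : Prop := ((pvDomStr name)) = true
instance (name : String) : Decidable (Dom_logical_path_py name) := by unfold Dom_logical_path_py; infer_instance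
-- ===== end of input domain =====

-- B replaces A's index scan over the split path segments by a single substring search
-- for the boundary marker on the normalized path (objective: alternative).

-- ===== PORT A =====
-- the 'for index in range(len(parts) - 3)' loop with its early return, transliterated
-- as recursion over the index list
def pvAFor (parts : List (List Char)) : List Nat → Option (List Char)
  | [] => none
  | i :: is =>
    if PySem.Chars.endswith (PySem.List.pyGetD parts (i : Int) []) ".data".toList &&
       decide (PySem.List.slice parts (some ((i : Int) + 1)) (some ((i : Int) + 3)) =
         ["data".toList, "aiswmm".toList]) then
      some (PySem.Chars.join ['/'] (PySem.List.slice parts (some ((i : Int) + 3)) none))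
    else pvAFor parts is

def logical_path_py (name : String) : String :=
  -- name.replace("\\", "/").lstrip("/"): lstrip with the one-character set "/" is
  -- exactly dropWhile (· == '/') (PySem has no lstrip-with-chars primitive)
  let normalized := (PySem.Str.replace name "\\" "/").toList.dropWhile (· == '/')
  let parts := PySem.Chars.splitOn normalized ['/']
  match pvAFor parts (List.range (parts.length - 3)) with
  | some tail => String.ofList ('/' :: tail)
  | none =>
    if !parts.isEmpty && PySem.Chars.startswith (parts.headD []) "aiswmm-".toList then
      String.ofList ('/' :: PySem.Chars.join ['/'] (PySem.List.slice parts (some 1) none))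
    else String.ofList ('/' :: normalized)

-- ===== PORT B =====
def logical_path_py_alt (name : String) : String :=
  -- same normalization line as Source B: replace then lstrip("/") = dropWhile (· == '/')
  let normalized := (PySem.Str.replace name "\\" "/").toList.dropWhile (· == '/')
  let marker := ".data/data/aiswmm/".toList
  let pos := PySem.Chars.find normalized marker
  if pos ≠ -1 then
    String.ofList ('/' :: PySem.List.slice normalized (some (pos + (marker.length : Int))) none)
  else if PySem.Chars.startswith normalized "aiswmm-".toList then
    let sep := PySem.Chars.find normalized ['/']
    if sep ≠ -1 then String.ofList ('/' :: PySem.List.slice normalized (some (sep + 1)) none)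
    else "/"
  else String.ofList ('/' :: normalized)

-- ===== PRECONDITION & SPEC =====
def Spec_logical_path_py (name : String) (out : String) : Prop := out = logical_path_py_alt name
instance (name : String) (out : String) : Decidable (Spec_logical_path_py name out) := by unfold Spec_logical_path_py; infer_instance

-- ===== CLAIM (what is proved, stated in full; the proofs are below) =====
def Claim_equal_logical_path_py : Prop := ∀ (name : String), Dom_logical_path_py name → Spec_logical_path_py name (logical_path_py name)

-- ===== LEMMAS AND PROOFS =====

theorem pvSplit_go (l : List Char) : ∀ (cur : List Char) (accs : List (List Char)) (fuel : Nat),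
    l.length < fuel →
    PySem.Chars.splitOn.go ['/'] fuel l cur accs =
      accs.reverse ++ List.splitOnP.go (fun a => a == '/') l cur := by
  induction l with
  | nil =>
    intro cur accs fuel h
    match fuel, h with
    | fuel+1, _ =>
      simp [PySem.Chars.splitOn.go, List.splitOnP.go]
  | cons c rest ih =>
    intro cur accs fuel h
    match fuel, h with
    | fuel+1, h =>
      rw [PySem.Chars.splitOn.go]
      rw [List.splitOnP.go.eq_def]
      simp only [List.isPrefixOf, Bool.and_true]
      by_cases hc : '/' = c
      · subst hc
        simp only [beq_self_eq_true, if_pos]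
        rw [show List.drop ['/'].length ('/' :: rest) = rest from rfl]
        rw [ih [] (cur.reverse :: accs) fuel (by simp at h ⊢; omega)]
        simp
      · have h1 : ('/' == c) = false := by simp [hc]
        have h2 : (c == '/') = false := by simp [Ne.symm hc]
        simp only [h1, h2, Bool.false_and, if_neg, Bool.false_eq_true, not_false_iff]
        rw [ih (c :: cur) accs fuel (by simp at h ⊢; omega)]

theorem pvSplit_eq (s : List Char) :
    PySem.Chars.splitOn s ['/'] = s.splitOn '/' := by
  rw [PySem.Chars.splitOn, pvSplit_go s [] [] (s.length + 1) (by omega)]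
  rfl

theorem pvSplitOnP_ne_nil (l : List Char) : List.splitOnP (fun a => a == '/') l ≠ [] := by
  induction l with
  | nil => simp [List.splitOnP_nil]
  | cons c rest ih =>
    rw [List.splitOnP_cons]
    split
    · simp
    · cases h : List.splitOnP (fun a => a == '/') rest with
      | nil => exact absurd h ih
      | cons a t => simp [h, List.modifyHead]

theorem pvSplit_mem (l : List Char) :
    ∀ p ∈ List.splitOnP (fun a => a == '/') l, '/' ∉ p := by
  induction l with
  | nil => simp [List.splitOnP_nil]
  | cons c rest ih =>
    rw [List.splitOnP_cons]
    split
    · intro p hp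
      rcases List.mem_cons.mp hp with h | h
      · simp [h]
      · exact ih p h
    · rename_i hc
      cases h : List.splitOnP (fun a => a == '/') rest with
      | nil => exact absurd h (pvSplitOnP_ne_nil rest)
      | cons a t =>
        simp only [h, List.modifyHead]
        intro p hp
        rcases List.mem_cons.mp hp with h' | h'
        · subst h'
          intro hmem
          rcases List.mem_cons.mp hmem with h'' | h''
          · simp at hc; exact hc (h''.symm ▸ rfl)
          · exact (ih a (h ▸ List.mem_cons_self)) h''
        · exact ih p (h ▸ List.mem_cons_of_mem a h')

theorem pvSplit_join (s : List Char) :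
    PySem.Chars.join ['/'] (s.splitOn '/') = s := by
  rw [PySem.Chars.join]
  exact List.intercalate_splitOn s '/'

theorem pvG (m₁ m₂ : List Char) : ∀ (u v : List Char), '/' ∉ m₁ → '/' ∉ u →
    ((m₁ ++ '/' :: m₂) <+: (u ++ '/' :: v) ↔ (u = m₁ ∧ m₂ <+: v)) := by
  induction m₁ with
  | nil =>
    intro u v _ hu
    cases u with
    | nil => simp [List.cons_prefix_cons]
    | cons c u' =>
      simp only [List.nil_append, List.cons_append, List.cons_prefix_cons]
      constructor
      · rintro ⟨h1, _⟩; exact absurd (h1 ▸ List.mem_cons_self) hu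
      · rintro ⟨h, _⟩; exact absurd h (by simp)
  | cons c m₁' ih =>
    intro u v hm hu
    cases u with
    | nil =>
      simp only [List.nil_append, List.cons_append, List.cons_prefix_cons]
      constructor
      · rintro ⟨h1, _⟩; exact absurd (h1 ▸ List.mem_cons_self) hm
      · rintro ⟨h, _⟩; exact absurd h.symm (by simp)
    | cons c' u' =>
      simp only [List.cons_append, List.cons_prefix_cons]
      rw [ih u' v (fun h => hm (List.mem_cons_of_mem c h)) (fun h => hu (List.mem_cons_of_mem c' h))]
      constructor
      · rintro ⟨h1, h2, h3⟩; exact ⟨by rw [h1, h2], h3⟩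
      · rintro ⟨h, h3⟩
        rcases List.cons.injEq .. ▸ h with ⟨h1, h2⟩
        exact ⟨h1.symm, h2, h3⟩

theorem pvG2 (m : List Char) : ∀ (u v : List Char), '/' ∉ m → '/' ∉ u →
    (m <+: (u ++ '/' :: v) ↔ m <+: u) := by
  induction m with
  | nil => intro u v _ _; simp
  | cons c m' ih =>
    intro u v hm hu
    cases u with
    | nil =>
      simp only [List.nil_append, List.cons_prefix_cons]
      constructor
      · rintro ⟨h1, _⟩; exact absurd (h1 ▸ List.mem_cons_self) hm
      · intro h; simp [List.prefix_nil] at h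
    | cons c' u' =>
      simp only [List.cons_append, List.cons_prefix_cons]
      rw [ih u' v (fun h => hm (List.mem_cons_of_mem c h)) (fun h => hu (List.mem_cons_of_mem c' h))]

theorem pvInfix_of_prefix_drop {m s : List Char} {j : Nat} (h : m <+: s.drop j) : m <:+: s :=
  h.isInfix.trans (List.drop_suffix j s).isInfix

theorem pvFind_eq_coe_iff (s m : List Char) (t : Nat) :
    PySem.Chars.find s m = (t : Int) ↔ (m <+: s.drop t ∧ ∀ i < t, ¬ m <+: s.drop i) := by
  constructor
  · intro h
    have h0 : 0 ≤ PySem.Chars.find s m := by rw [h]; positivity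
    have := PySem.Chars.find_spec h0
    rw [h] at this
    simpa using this
  · rintro ⟨hocc, hmin⟩
    have hinf : m <:+: s := pvInfix_of_prefix_drop hocc
    have hne : PySem.Chars.find s m ≠ -1 := by
      rw [ne_eq, PySem.Chars.find_eq_neg_one_iff]; exact fun h => h hinf
    have h0 : 0 ≤ PySem.Chars.find s m := by
      have := PySem.Chars.neg_one_le_find s m; omega
    obtain ⟨hsp, hspmin⟩ := PySem.Chars.find_spec h0
    have : (PySem.Chars.find s m).toNat = t := by
      rcases Nat.lt_trichotomy (PySem.Chars.find s m).toNat t with h | h | h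
      · exact absurd hsp (hmin _ h)
      · exact h
      · exact absurd hocc (hspmin _ h)
    omega

theorem pvNoPrefix {m u : List Char} (hm : '/' ∈ m) (hu : '/' ∉ u) : ¬ m <+: u :=
  fun h => hu (h.subset hm)

theorem pvPref (rest : List (List Char)) (hne : rest ≠ []) (hm : ∀ p ∈ rest, '/' ∉ p) :
    ("data/aiswmm/".toList <+: PySem.Chars.join ['/'] rest ↔
      ∃ q rest', rest = "data".toList :: "aiswmm".toList :: q :: rest') := by
  match rest with
  | [d] =>
    rw [PySem.Chars.join_singleton]
    constructor
    · intro h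
      exact absurd h (pvNoPrefix (by decide) (hm d (by simp)))
    · rintro ⟨q, rest', h⟩; simp at h
  | d :: e :: rest₃ =>
    rw [PySem.Chars.join_cons_cons]
    rw [show "data/aiswmm/".toList = "data".toList ++ '/' :: "aiswmm/".toList from rfl]
    rw [show d ++ ['/'] ++ PySem.Chars.join ['/'] (e :: rest₃)
        = d ++ '/' :: PySem.Chars.join ['/'] (e :: rest₃) by simp]
    rw [pvG _ _ _ _ (by decide) (hm d (by simp))]
    match rest₃ with
    | [] =>
      rw [PySem.Chars.join_singleton]
      constructor
      · rintro ⟨h1, h2⟩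
        exact absurd h2 (pvNoPrefix (by decide) (hm e (by simp)))
      · rintro ⟨q, rest', h⟩; simp at h
    | q :: rest' =>
      rw [PySem.Chars.join_cons_cons]
      rw [show "aiswmm/".toList = "aiswmm".toList ++ '/' :: ([] : List Char) from rfl]
      rw [show e ++ ['/'] ++ PySem.Chars.join ['/'] (q :: rest')
          = e ++ '/' :: PySem.Chars.join ['/'] (q :: rest') by simp]
      rw [pvG _ _ _ _ (by decide) (hm e (by simp))]
      simp only [List.nil_prefix, and_true]
      constructor
      · rintro ⟨h1, h2⟩; exact ⟨q, rest', by rw [h1, h2]⟩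
      · rintro ⟨q', rest'', h⟩
        simp only [List.cons.injEq] at h
        exact ⟨h.1, h.2.1⟩

theorem pvDropShift (p s' : List Char) (j : Nat) (hj : p.length < j) :
    (p ++ '/' :: s').drop j = s'.drop (j - p.length - 1) := by
  rw [List.drop_append, List.drop_eq_nil_of_le (by omega), List.nil_append]
  have h1 : j - p.length = (j - p.length - 1) + 1 := by omega
  conv_lhs => rw [h1]
  rw [List.drop_succ_cons]

theorem pvF1 (p s' : List Char) (hp : '/' ∉ p) (i : Nat) (hi : i ≤ p.length) :
    (".data/data/aiswmm/".toList <+: (p ++ '/' :: s').drop i ↔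
      (p.drop i = ".data".toList ∧ "data/aiswmm/".toList <+: s')) := by
  rw [List.drop_append_of_le_length hi]
  rw [show ".data/data/aiswmm/".toList = ".data".toList ++ '/' :: "data/aiswmm/".toList from rfl]
  rw [pvG _ _ _ _ (by decide) (fun h => hp (List.mem_of_mem_drop h))]

theorem pvFindRec (p s' : List Char) (hp : '/' ∉ p) :
    PySem.Chars.find (p ++ '/' :: s') ".data/data/aiswmm/".toList =
      if ".data".toList <:+ p ∧ "data/aiswmm/".toList <+: s' then ((p.length - 5 : Nat) : Int)
      else if PySem.Chars.find s' ".data/data/aiswmm/".toList = -1 then -1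
      else ((p.length + 1 : Nat) : Int) + PySem.Chars.find s' ".data/data/aiswmm/".toList := by
  by_cases hc : ".data".toList <:+ p ∧ "data/aiswmm/".toList <+: s'
  · rw [if_pos hc]
    have h5 : 5 ≤ p.length := by
      have := hc.1.length_le; simpa using this
    have hdrop : p.drop (p.length - 5) = ".data".toList := by
      have := List.suffix_iff_eq_drop.mp hc.1
      simpa using this.symm
    rw [pvFind_eq_coe_iff]
    constructor
    · rw [pvF1 p s' hp _ (by omega)]
      exact ⟨hdrop, hc.2⟩
    · intro i hilt h
      have hile : i ≤ p.length := by omega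
      rw [pvF1 p s' hp i hile] at h
      have := congrArg List.length h.1
      simp [List.length_drop] at this
      omega
  · rw [if_neg hc]
    have hno : ∀ i ≤ p.length, ¬ ".data/data/aiswmm/".toList <+: (p ++ '/' :: s').drop i := by
      intro i hi h
      rw [pvF1 p s' hp i hi] at h
      exact hc ⟨h.1 ▸ List.drop_suffix i p, h.2⟩
    by_cases hf : PySem.Chars.find s' ".data/data/aiswmm/".toList = -1
    · rw [if_pos hf]
      rw [PySem.Chars.find_eq_neg_one_iff]
      intro hinf
      have : ∃ j, ".data/data/aiswmm/".toList <+: (p ++ '/' :: s').drop j := by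
        rw [PySem.Chars.exists_prefix_drop_iff_isIn, PySem.Chars.isIn_iff_infix]
        exact hinf
      obtain ⟨j, hj⟩ := this
      by_cases hjp : j ≤ p.length
      · exact hno j hjp hj
      · rw [pvDropShift p s' j (by omega)] at hj
        rw [PySem.Chars.find_eq_neg_one_iff] at hf
        exact hf (pvInfix_of_prefix_drop hj)
    · rw [if_neg hf]
      have h0 : 0 ≤ PySem.Chars.find s' ".data/data/aiswmm/".toList := by
        have := PySem.Chars.neg_one_le_find s' ".data/data/aiswmm/".toList; omega
      obtain ⟨hocc, hmin⟩ := PySem.Chars.find_spec h0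
      set t' := (PySem.Chars.find s' ".data/data/aiswmm/".toList).toNat with ht'
      have heq : PySem.Chars.find (p ++ '/' :: s') ".data/data/aiswmm/".toList
          = ((p.length + 1 + t' : Nat) : Int) := by
        rw [pvFind_eq_coe_iff]
        constructor
        · rw [pvDropShift p s' _ (by omega)]
          have : p.length + 1 + t' - p.length - 1 = t' := by omega
          rw [this]; exact hocc
        · intro i hilt h
          by_cases hip : i ≤ p.length
          · exact hno i hip h
          · rw [pvDropShift p s' i (by omega)] at h
            exact hmin _ (by omega) h
      rw [heq, ← Int.toNat_of_nonneg h0, ← ht']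
      push_cast
      ring

def pvScan : List (List Char) → Option (List Char)
  | p :: d :: a :: q :: rest =>
    if PySem.Chars.endswith p ".data".toList ∧ d = "data".toList ∧ a = "aiswmm".toList then
      some (PySem.Chars.join ['/'] (q :: rest))
    else pvScan (d :: a :: q :: rest)
  | _ => none

theorem pvCore : ∀ (parts : List (List Char)), parts ≠ [] → (∀ p ∈ parts, '/' ∉ p) →
    (pvScan parts = none ∧
      PySem.Chars.find (PySem.Chars.join ['/'] parts) ".data/data/aiswmm/".toList = -1) ∨
    (∃ t : Nat,
      pvScan parts = some ((PySem.Chars.join ['/'] parts).drop (t + 18)) ∧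
      PySem.Chars.find (PySem.Chars.join ['/'] parts) ".data/data/aiswmm/".toList = (t : Int))
  | [], hne, _ => absurd rfl hne
  | [p], _, hm => by
    left
    refine ⟨rfl, ?_⟩
    rw [PySem.Chars.join_singleton, PySem.Chars.find_eq_neg_one_iff]
    intro hinf
    exact hm p (by simp) (hinf.subset (by decide))
  | p :: r :: rest₂, _, hm => by
    have hmt : ∀ x ∈ r :: rest₂, '/' ∉ x := fun x hx => hm x (List.mem_cons_of_mem p hx)
    have hp : '/' ∉ p := hm p List.mem_cons_self
    have hs : PySem.Chars.join ['/'] (p :: r :: rest₂)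
        = p ++ '/' :: PySem.Chars.join ['/'] (r :: rest₂) := by
      rw [PySem.Chars.join_cons_cons]; simp
    have hshape := pvPref (r :: rest₂) (by simp) hmt
    rw [hs, pvFindRec p _ hp]
    by_cases hc : ".data".toList <:+ p ∧ "data/aiswmm/".toList <+: PySem.Chars.join ['/'] (r :: rest₂)
    · rw [if_pos hc]
      obtain ⟨q, rest', hqr⟩ := hshape.mp hc.2
      right
      refine ⟨p.length - 5, ?_, rfl⟩
      have h5 : 5 ≤ p.length := by have := hc.1.length_le; simpa using this
      have hsplit : PySem.Chars.join ['/'] (r :: rest₂)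
          = "data/aiswmm/".toList ++ PySem.Chars.join ['/'] (q :: rest') := by
        rw [hqr, PySem.Chars.join_cons_cons, PySem.Chars.join_cons_cons]
        rfl
      have hdrop : (p ++ '/' :: PySem.Chars.join ['/'] (r :: rest₂)).drop (p.length - 5 + 18)
          = PySem.Chars.join ['/'] (q :: rest') := by
        rw [pvDropShift _ _ _ (by omega)]
        have : p.length - 5 + 18 - p.length - 1 = 12 := by omega
        rw [this, hsplit, List.drop_append]
        rw [show List.drop 12 "data/aiswmm/".toList = [] from rfl]
        rw [show (12 : Nat) - ("data/aiswmm/".toList).length = 0 from rfl]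
        simp
      rw [hdrop, hqr]
      show pvScan (p :: "data".toList :: "aiswmm".toList :: q :: rest') = _
      rw [pvScan]
      rw [if_pos ⟨(PySem.Chars.endswith_iff p ".data".toList).mpr hc.1, rfl, rfl⟩]
    · rw [if_neg hc]
      have hscan : pvScan (p :: r :: rest₂) = pvScan (r :: rest₂) := by
        match rest₂ with
        | [] => rfl
        | [a] => rfl
        | a :: q :: rest' =>
          rw [pvScan]
          rw [if_neg ?_]
          intro ⟨h1, h2, h3⟩
          exact hc ⟨(PySem.Chars.endswith_iff p ".data".toList).mp h1,
            hshape.mpr ⟨q, rest', by rw [h2, h3]⟩⟩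
      rcases pvCore (r :: rest₂) (by simp) hmt with ⟨hsn, hsf⟩ | ⟨t', hsc, hsf⟩
      · left
        rw [if_pos hsf, hscan]
        exact ⟨hsn, rfl⟩
      · right
        rw [if_neg (by rw [hsf]; omega)]
        refine ⟨p.length + 1 + t', ?_, ?_⟩
        · rw [hscan, hsc]
          congr 1
          rw [pvDropShift _ _ _ (by omega)]
          congr 1
          omega
        · rw [hsf]
          push_cast
          ring

theorem pvAFor_shift (x : List Char) (xs : List (List Char)) :
    ∀ l : List Nat, pvAFor (x :: xs) (l.map Nat.succ) = pvAFor xs l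
  | [] => rfl
  | i :: is => by
    rw [List.map_cons, pvAFor, pvAFor]
    rw [show ((i.succ : Nat) : Int) = ((i : Nat) : Int) + 1 by push_cast; ring]
    rw [show ((i : Nat) : Int) + 1 + 1 = ((i + 2 : Nat) : Int) by push_cast; ring]
    rw [show ((i : Nat) : Int) + 1 + 3 = ((i + 4 : Nat) : Int) by push_cast; ring]
    rw [show ((i : Nat) : Int) + 1 = ((i + 1 : Nat) : Int) by push_cast; ring]
    rw [show ((i : Nat) : Int) + 3 = ((i + 3 : Nat) : Int) by push_cast; ring]
    rw [PySem.List.pyGetD_natCast, PySem.List.pyGetD_natCast,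
      PySem.List.slice_natCast, PySem.List.slice_natCast,
      PySem.List.slice_from_natCast, PySem.List.slice_from_natCast]
    rw [show (i + 4) - (i + 2) = 2 from by omega, show (i + 3) - (i + 1) = 2 from by omega]
    simp only [List.getD_cons_succ, List.drop_succ_cons]
    rw [pvAFor_shift x xs is]
    rfl

theorem pvAFor_eq_scan : ∀ (parts : List (List Char)),
    pvAFor parts (List.range (parts.length - 3)) = pvScan parts
  | [] => rfl
  | [p] => rfl
  | [p, d] => rfl
  | [p, d, a] => rfl
  | p :: d :: a :: q :: rest => by
    have hlen : (p :: d :: a :: q :: rest).length - 3 = rest.length + 1 := by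
      simp
    rw [hlen, List.range_succ_eq_map, pvAFor, pvScan]
    have hrange : List.range rest.length = List.range ((d :: a :: q :: rest).length - 3) := by
      simp
    have hshift : pvAFor (p :: d :: a :: q :: rest) ((List.range rest.length).map Nat.succ)
        = pvScan (d :: a :: q :: rest) := by
      rw [pvAFor_shift, hrange, pvAFor_eq_scan]
    rw [hshift]
    have e1 : PySem.List.pyGetD (p :: d :: a :: q :: rest) ((0 : Nat) : Int) [] = p := by
      rw [PySem.List.pyGetD_natCast]; rfl
    have e2 : PySem.List.slice (p :: d :: a :: q :: rest)
        (some (((0 : Nat) : Int) + 1)) (some (((0 : Nat) : Int) + 3)) = [d, a] := by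
      rw [show (((0 : Nat) : Int) + 1) = ((1 : Nat) : Int) by push_cast,
        show (((0 : Nat) : Int) + 3) = ((3 : Nat) : Int) by push_cast,
        PySem.List.slice_natCast]
      rfl
    have e3 : PySem.List.slice (p :: d :: a :: q :: rest) (some (((0 : Nat) : Int) + 3)) none
        = q :: rest := by
      rw [show (((0 : Nat) : Int) + 3) = ((3 : Nat) : Int) by push_cast,
        PySem.List.slice_from_natCast]
      rfl
    rw [e1, e2, e3]
    by_cases hcond : PySem.Chars.endswith p ".data".toList = true ∧
        d = "data".toList ∧ a = "aiswmm".toList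
    · rw [if_pos (by
        simp only [Bool.and_eq_true, decide_eq_true_eq]
        exact ⟨by simpa using hcond.1, by rw [hcond.2.1, hcond.2.2]⟩), if_pos hcond]
    · rw [if_neg ?hb, if_neg hcond]
      case hb =>
        simp only [Bool.and_eq_true, decide_eq_true_eq, List.cons.injEq, and_true]
        intro hcc
        exact hcond ⟨hcc.1, hcc.2.1, hcc.2.2⟩

theorem pvBody (cs : List Char) :
    (match pvAFor (PySem.Chars.splitOn cs ['/'])
        (List.range ((PySem.Chars.splitOn cs ['/']).length - 3)) with
    | some tail => String.ofList ('/' :: tail)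
    | none =>
      if !(PySem.Chars.splitOn cs ['/']).isEmpty &&
          PySem.Chars.startswith ((PySem.Chars.splitOn cs ['/']).headD []) "aiswmm-".toList then
        String.ofList ('/' :: PySem.Chars.join ['/']
          (PySem.List.slice (PySem.Chars.splitOn cs ['/']) (some 1) none))
      else String.ofList ('/' :: cs)) =
    (if PySem.Chars.find cs ".data/data/aiswmm/".toList ≠ -1 then
      String.ofList ('/' :: PySem.List.slice cs
        (some (PySem.Chars.find cs ".data/data/aiswmm/".toList + ((".data/data/aiswmm/".toList).length : Int))) none)
    else if PySem.Chars.startswith cs "aiswmm-".toList then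
      if PySem.Chars.find cs ['/'] ≠ -1 then
        String.ofList ('/' :: PySem.List.slice cs (some (PySem.Chars.find cs ['/'] + 1)) none)
      else "/"
    else String.ofList ('/' :: cs)) := by
  rw [pvSplit_eq, pvAFor_eq_scan]
  have hne : cs.splitOn '/' ≠ [] := pvSplitOnP_ne_nil cs
  have hmem : ∀ p ∈ cs.splitOn '/', '/' ∉ p := pvSplit_mem cs
  have hjoin : PySem.Chars.join ['/'] (cs.splitOn '/') = cs := pvSplit_join cs
  rcases pvCore (cs.splitOn '/') hne hmem with ⟨hsn, hf⟩ | ⟨t, hsc, hf⟩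
  · rw [hjoin] at hf
    simp only [hsn]
    conv_rhs => rw [if_neg (show ¬ PySem.Chars.find cs ".data/data/aiswmm/".toList ≠ -1
      by rw [hf]; simp)]
    obtain ⟨p, rest, hpr⟩ : ∃ p rest, cs.splitOn '/' = p :: rest := by
      cases h : cs.splitOn '/' with
      | nil => exact absurd h hne
      | cons a b => exact ⟨a, b, rfl⟩
    have hp : '/' ∉ p := hmem p (hpr ▸ List.mem_cons_self)
    match rest, hpr with
    | [], hpr =>
      have hcse : cs = p := by rw [← hjoin, hpr, PySem.Chars.join_singleton]
      rw [hpr]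
      simp only [List.isEmpty_cons, Bool.not_false, Bool.true_and, List.headD_cons, hcse]
      by_cases hsw : PySem.Chars.startswith p "aiswmm-".toList
      · rw [if_pos hsw, if_pos hsw]
        have hfs : PySem.Chars.find p ['/'] = -1 := by
          rw [PySem.Chars.find_eq_neg_one_iff]
          intro hinf
          exact hp (hinf.subset (by simp))
        rw [if_neg (by rw [hfs]; simp), PySem.List.slice_from_one]
        rfl
      · rw [if_neg (by simpa using hsw), if_neg hsw]
    | r :: rest₂, hpr =>
      have hs' : cs = p ++ '/' :: PySem.Chars.join ['/'] (r :: rest₂) := by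
        rw [← hjoin, hpr, PySem.Chars.join_cons_cons]; simp
      rw [hpr]
      simp only [List.isEmpty_cons, Bool.not_false, Bool.true_and, List.headD_cons]
      have hsweq : PySem.Chars.startswith cs "aiswmm-".toList
          = PySem.Chars.startswith p "aiswmm-".toList := by
        have hiff : "aiswmm-".toList <+: cs ↔ "aiswmm-".toList <+: p := by
          rw [hs']; exact pvG2 _ _ _ (by decide) hp
        by_cases h : "aiswmm-".toList <+: p
        · rw [(PySem.Chars.startswith_iff _ _).mpr h, (PySem.Chars.startswith_iff _ _).mpr (hiff.mpr h)]
        · have h1 : PySem.Chars.startswith p "aiswmm-".toList = false := by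
            rw [Bool.eq_false_iff, ne_eq, PySem.Chars.startswith_iff]; exact h
          have h2 : PySem.Chars.startswith cs "aiswmm-".toList = false := by
            rw [Bool.eq_false_iff, ne_eq, PySem.Chars.startswith_iff]
            exact fun hc => h (hiff.mp hc)
          rw [h1, h2]
      rw [hsweq]
      by_cases hsw : PySem.Chars.startswith p "aiswmm-".toList
      · rw [if_pos hsw, if_pos hsw]
        have hfs : PySem.Chars.find cs ['/'] = ((p.length : Nat) : Int) := by
          rw [pvFind_eq_coe_iff]
          constructor
          · rw [hs', List.drop_append_of_le_length le_rfl, List.drop_length, List.nil_append]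
            simp [List.cons_prefix_cons]
          · intro i hi hpre
            rw [hs', List.drop_append_of_le_length (by omega),
              List.drop_eq_getElem_cons (by omega)] at hpre
            rw [List.cons_append, List.cons_prefix_cons] at hpre
            exact hp (hpre.1 ▸ List.getElem_mem _)
        have hnn : (0 : Int) ≤ ((p.length : Nat) : Int) := Int.natCast_nonneg _
        rw [if_pos (by rw [hfs]; omega), hfs]
        rw [show ((p.length : Nat) : Int) + 1 = ((p.length + 1 : Nat) : Int) by push_cast; ring]
        rw [PySem.List.slice_from_natCast, PySem.List.slice_from_one, List.tail_cons]
        rw [hs', pvDropShift _ _ _ (by omega)]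
        simp
      · rw [if_neg (by simpa using hsw), if_neg hsw]
  · rw [hjoin] at hf hsc
    simp only [hsc]
    have hnn : (0 : Int) ≤ (t : Int) := Int.natCast_nonneg _
    rw [hf, if_pos (by omega)]
    rw [show ((t : Nat) : Int) + ((".data/data/aiswmm/".toList).length : Int)
        = ((t + 18 : Nat) : Int) by push_cast; simp]
    rw [PySem.List.slice_from_natCast]

-- ===== VERDICT (by name: the statement is the Claim_ definition above) =====
theorem logical_path_py_spec : Claim_equal_logical_path_py := by
  intro name _
  show logical_path_py name = logical_path_py_alt name
  simp only [logical_path_py, logical_path_py_alt]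
  exact pvBody _
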